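-- pv_equiv track=rewrite | github.com/mso-docs/writetech-accelerator-portfolio-mackenzie | docs/ai-for-docs/fix_formatting.py | fix_markdown_formatting
-- ===== SOURCE A (Python) =====
-- def fix_markdown_formatting(content):
--     """Fix common markdown formatting issues"""
--     lines = content.split('\n')
--     fixed_lines = []
--
--     for i, line in enumerate(lines):
--         # Remove trailing spaces
--         line = line.rstrip()
--
--         # Fix heading spacing - add blank line before and after headings
--         if line.startswith('#'):
--             # Add blank line before heading (if previous line is not blank)
--             if i > 0 and fixed_lines and fixed_lines[-1].strip():
--                 fixed_lines.append('')
--             fixed_lines.append(line)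
--             # Add blank line after heading (if next line exists and is not blank)
--             if i < len(lines) - 1 and lines[i + 1].strip():
--                 fixed_lines.append('')
--                 fixed_lines.append('')  # We'll remove the extra one later
--         # Fix list spacing - add blank line before first list item
--         elif line.startswith('- ') or line.startswith('* '):
--             # Check if previous line is not a list item and not blank
--             if (i > 0 and fixed_lines and fixed_lines[-1].strip() and
--                 not fixed_lines[-1].startswith('- ') and
--                 not fixed_lines[-1].startswith('* ')):
--                 fixed_lines.append('')
--             fixed_lines.append(line)
--         else:
--             fixed_lines.append(line)
--
--     # Remove duplicate blank lines
--     result_lines = []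
--     prev_blank = False
--     for line in fixed_lines:
--         if line.strip() == '':
--             if not prev_blank:
--                 result_lines.append(line)
--             prev_blank = True
--         else:
--             result_lines.append(line)
--             prev_blank = False
--
--     # Ensure file ends with single newline
--     if result_lines and result_lines[-1].strip():
--         result_lines.append('')
--
--     return '\n'.join(result_lines)
-- ===== SOURCE B (Python) =====
-- def fix_markdown_formatting(content):
--     """Fix common markdown formatting issues (single-pass emit version)"""
--     lines = content.split('\n')
--     out = []
--
--     def emit(s):
--         # append s unless it is a blank that would follow another blank
--         if s != '' or not out or out[-1] != '':
--             out.append(s)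
--
--     for i, raw in enumerate(lines):
--         line = raw.rstrip()
--         if line.startswith('#'):
--             if out and out[-1] != '':
--                 emit('')
--             emit(line)
--             if i + 1 < len(lines) and lines[i + 1].strip():
--                 emit('')
--         elif line.startswith('- ') or line.startswith('* '):
--             if out and out[-1] != '' and not out[-1].startswith(('- ', '* ')):
--                 emit('')
--             emit(line)
--         else:
--             emit(line)
--
--     if out and out[-1] != '':
--         out.append('')
--     return '\n'.join(out)
-- ===== Notes on version B (the rewrite author's own statement) =====
-- stated objective: simpler
-- what changed: Replaces A's three passes (build fixed_lines with doubled blanks, then a dedup pass collapsing consecutive blank lines, then the trailing-blank fix) by a single pass over the lines with an emit helper that simply never appends a blank line right after another blank line.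
import Mathlib
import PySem

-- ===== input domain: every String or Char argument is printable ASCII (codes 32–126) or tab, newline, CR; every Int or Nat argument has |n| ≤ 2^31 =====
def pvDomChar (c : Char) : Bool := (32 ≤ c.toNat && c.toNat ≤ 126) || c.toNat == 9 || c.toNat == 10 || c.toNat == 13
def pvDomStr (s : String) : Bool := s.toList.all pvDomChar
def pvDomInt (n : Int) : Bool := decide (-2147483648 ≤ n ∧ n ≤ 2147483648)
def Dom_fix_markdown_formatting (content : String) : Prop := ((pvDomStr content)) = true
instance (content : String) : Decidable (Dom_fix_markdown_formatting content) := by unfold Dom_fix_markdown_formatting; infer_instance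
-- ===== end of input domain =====

-- B replaces A's three passes (build fixed_lines, collapse duplicate blank lines, add the trailing
-- blank) by a single pass with an 'emit' helper that never writes two consecutive blank lines;
-- same return value on every input, no speed claim.

-- ===== PORT A =====

def pvLastA (fixed : List String) : String := (PySem.List.pyGet? fixed (-1)).getD ""
def pvDedupStep (st : List String × Bool) (line : String) : List String × Bool :=
  if PySem.Str.strip line = "" then
    (if st.2 then st.1 else st.1 ++ [line], true)
  else (st.1 ++ [line], false)
def pvFixLoopA : List String → Bool → List String → List String
  | [], _, fixed => fixed
  | raw :: rest, started, fixed =>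
    let line := PySem.Str.rstrip raw
    let fixed' :=
      if PySem.Str.startswith line "#" then
        let f1 := if started = true ∧ fixed ≠ [] ∧ PySem.Str.strip (pvLastA fixed) ≠ "" then
            fixed ++ [""] else fixed
        let f2 := f1 ++ [line]
        match rest with
        | next :: _ => if PySem.Str.strip next ≠ "" then f2 ++ ["", ""] else f2
        | [] => f2
      else if PySem.Str.startswith line "- " = true ∨ PySem.Str.startswith line "* " = true then
        if started = true ∧ fixed ≠ [] ∧ PySem.Str.strip (pvLastA fixed) ≠ "" ∧
            ¬ PySem.Str.startswith (pvLastA fixed) "- " = true ∧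
            ¬ PySem.Str.startswith (pvLastA fixed) "* " = true then
          fixed ++ ["", line]
        else fixed ++ [line]
      else fixed ++ [line]
    pvFixLoopA rest true fixed'
def fix_markdown_formatting (content : String) : String :=
  let lines := (PySem.Str.split? content "\n").getD []
  let fixed := pvFixLoopA lines false []
  let res := (fixed.foldl pvDedupStep ([], false)).1
  let res2 := if res ≠ [] ∧ PySem.Str.strip (pvLastA res) ≠ "" then res ++ [""] else res
  PySem.Str.join "\n" res2

-- ===== PORT B =====

def pvLastB (out : List String) : String := (PySem.List.pyGet? out (-1)).getD ""
def pvEmitB (out : List String) (s : String) : List String :=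
  if s ≠ "" ∨ out = [] ∨ pvLastB out ≠ "" then out ++ [s] else out
def pvLoopB : List String → List String → List String
  | [], out => out
  | raw :: rest, out =>
    let line := PySem.Str.rstrip raw
    let out' :=
      if PySem.Str.startswith line "#" then
        let o1 := if out ≠ [] ∧ pvLastB out ≠ "" then pvEmitB out "" else out
        let o2 := pvEmitB o1 line
        match rest with
        | next :: _ => if PySem.Str.strip next ≠ "" then pvEmitB o2 "" else o2
        | [] => o2
      else if PySem.Str.startswith line "- " = true ∨ PySem.Str.startswith line "* " = true then
        let o1 := if out ≠ [] ∧ pvLastB out ≠ "" ∧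
            ¬ PySem.Str.startswith (pvLastB out) "- " = true ∧
            ¬ PySem.Str.startswith (pvLastB out) "* " = true then pvEmitB out "" else out
        pvEmitB o1 line
      else pvEmitB out line
    pvLoopB rest out'
def fix_markdown_formatting_alt (content : String) : String :=
  let lines := (PySem.Str.split? content "\n").getD []
  let out := pvLoopB lines []
  let out2 := if out ≠ [] ∧ pvLastB out ≠ "" then out ++ [""] else out
  PySem.Str.join "\n" out2

-- ===== PRECONDITION & SPEC =====
def Spec_fix_markdown_formatting (content : String) (out : String) : Prop := out = fix_markdown_formatting_alt content
instance (content : String) (out : String) : Decidable (Spec_fix_markdown_formatting content out) := by unfold Spec_fix_markdown_formatting; infer_instance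

-- ===== CLAIM (what is proved, stated in full; the proofs are below) =====
def Claim_equal_fix_markdown_formatting : Prop := ∀ (content : String), Dom_fix_markdown_formatting content → Spec_fix_markdown_formatting content (fix_markdown_formatting content)

-- ===== LEMMAS AND PROOFS =====

def pvNorm (f : List String) : Prop := ∀ e ∈ f, PySem.Str.strip e = "" → e = ""

def pvD (f : List String) : List String × Bool := f.foldl pvDedupStep ([], false)

theorem pvD_append (f c : List String) :
    pvD (f ++ c) = c.foldl pvDedupStep (pvD f) := by
  simp [pvD, List.foldl_append]

theorem pvLastA_eq (l : List String) : pvLastA l = l.getLast?.getD "" := by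
  cases l with
  | nil => rfl
  | cons a t => simp [pvLastA, PySem.List.pyGet?, PySem.List.pyIdx?, List.getLast?_eq_getElem?]

theorem pvLastB_eq (l : List String) : pvLastB l = l.getLast?.getD "" := by
  cases l with
  | nil => rfl
  | cons a t => simp [pvLastB, PySem.List.pyGet?, PySem.List.pyIdx?, List.getLast?_eq_getElem?]

theorem pvRstrip_nil_iff (k : List Char) :
    PySem.Chars.rstrip k = [] ↔ ∀ c ∈ k, PySem.Chars.isspace c = true := by
  simp [PySem.Chars.rstrip, List.dropWhile_eq_nil_iff]

theorem pvStrip_imp_ws (m : List Char) (h : PySem.Chars.strip m = []) :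
    ∀ c ∈ m, PySem.Chars.isspace c = true := by
  intro c hc
  have h2 := (pvRstrip_nil_iff (PySem.Chars.lstrip m)).1 h
  have hsplit : c ∈ List.takeWhile PySem.Chars.isspace m ∨ c ∈ List.dropWhile PySem.Chars.isspace m := by
    rw [← List.mem_append, List.takeWhile_append_dropWhile]; exact hc
  rcases hsplit with h1 | h1
  · exact List.mem_takeWhile_imp h1
  · exact h2 c h1

theorem pvRstrip_ws_nil (m : List Char) (h : ∀ c ∈ PySem.Chars.rstrip m, PySem.Chars.isspace c = true) :
    PySem.Chars.rstrip m = [] := by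
  by_contra hne
  unfold PySem.Chars.rstrip at *
  have hdne : List.dropWhile PySem.Chars.isspace m.reverse ≠ [] := by simpa using hne
  have hhead := List.head_dropWhile_not (p := PySem.Chars.isspace) (l := m.reverse) hdne
  rw [h _ (by simp [List.head_mem])] at hhead
  simp at hhead

theorem pvNorm_rstrip (s : String) :
    PySem.Str.strip (PySem.Str.rstrip s) = "" → PySem.Str.rstrip s = "" := by
  intro h
  have h1 : PySem.Chars.strip (PySem.Chars.rstrip s.toList) = [] := by
    have := congrArg String.toList h
    simpa using this
  have h2 : PySem.Chars.rstrip s.toList = [] :=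
    pvRstrip_ws_nil s.toList (pvStrip_imp_ws _ h1)
  show String.ofList _ = ""
  rw [h2]

theorem pvStartswith_ne_empty (s p : String) (hp : p ≠ "")
    (h : PySem.Str.startswith s p = true) : s ≠ "" := by
  intro hs
  subst hs
  have := (PySem.Chars.startswith_iff _ _).1 h
  simp at this
  subst this
  exact hp rfl

theorem pvD_spec (f : List String) (hn : pvNorm f) :
    (pvD f).1.getLast? = f.getLast? ∧ (pvD f).2 = decide (f.getLast? = some "") := by
  induction f using List.reverseRecOn with
  | nil => simp [pvD]
  | append_singleton g x ih =>
    have hng : pvNorm g := fun e he => hn e (by simp [he])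
    have hx := hn x (by simp)
    obtain ⟨ih1, ih2⟩ := ih hng
    rw [pvD_append]
    by_cases hb : PySem.Str.strip x = ""
    · have hx0 : x = "" := hx hb
      subst hx0
      by_cases hp : g.getLast? = some ""
      · simp [List.foldl, pvDedupStep, hb, ih2, hp, ih1]
      · simp [List.foldl, pvDedupStep, hb, ih2, hp]
    · have hxne : x ≠ "" := fun h => hb (by subst h; rfl)
      simp [List.foldl, pvDedupStep, hb, hxne]

theorem pvD_nil_iff (f : List String) (hn : pvNorm f) :
    (pvD f).1 = [] ↔ f = [] := by
  have h := (pvD_spec f hn).1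
  constructor
  · intro hh; rw [hh] at h
    exact List.getLast?_eq_none_iff.mp h.symm
  · intro hh; subst hh; rfl

theorem pvNorm_append (f c : List String) (hf : pvNorm f) (hc : pvNorm c) :
    pvNorm (f ++ c) := by
  intro e he; rcases List.mem_append.1 he with h | h
  · exact hf e h
  · exact hc e h

theorem pvFixLoopA_cons (raw : String) (rest : List String) (started : Bool) (fixed : List String) :
    pvFixLoopA (raw :: rest) started fixed =
    pvFixLoopA rest true
      (if PySem.Str.startswith (PySem.Str.rstrip raw) "#" then
        (if PySem.Str.strip (match rest with | next :: _ => next | [] => "") ≠ "" ∧ rest ≠ [] then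
          (if started = true ∧ fixed ≠ [] ∧ PySem.Str.strip (pvLastA fixed) ≠ "" then
              fixed ++ [""] else fixed) ++ [PySem.Str.rstrip raw] ++ ["", ""]
        else
          (if started = true ∧ fixed ≠ [] ∧ PySem.Str.strip (pvLastA fixed) ≠ "" then
              fixed ++ [""] else fixed) ++ [PySem.Str.rstrip raw])
      else if PySem.Str.startswith (PySem.Str.rstrip raw) "- " = true ∨
          PySem.Str.startswith (PySem.Str.rstrip raw) "* " = true then
        if started = true ∧ fixed ≠ [] ∧ PySem.Str.strip (pvLastA fixed) ≠ "" ∧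
            ¬ PySem.Str.startswith (pvLastA fixed) "- " = true ∧
            ¬ PySem.Str.startswith (pvLastA fixed) "* " = true then
          fixed ++ ["", PySem.Str.rstrip raw]
        else fixed ++ [PySem.Str.rstrip raw]
      else fixed ++ [PySem.Str.rstrip raw]) := by
  cases rest <;> simp [pvFixLoopA]

theorem pvLoopB_cons (raw : String) (rest : List String) (out : List String) :
    pvLoopB (raw :: rest) out =
    pvLoopB rest
      (if PySem.Str.startswith (PySem.Str.rstrip raw) "#" then
        (if PySem.Str.strip (match rest with | next :: _ => next | [] => "") ≠ "" ∧ rest ≠ [] then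
          pvEmitB (pvEmitB (if out ≠ [] ∧ pvLastB out ≠ "" then pvEmitB out "" else out)
            (PySem.Str.rstrip raw)) ""
        else
          pvEmitB (if out ≠ [] ∧ pvLastB out ≠ "" then pvEmitB out "" else out)
            (PySem.Str.rstrip raw))
      else if PySem.Str.startswith (PySem.Str.rstrip raw) "- " = true ∨
          PySem.Str.startswith (PySem.Str.rstrip raw) "* " = true then
        pvEmitB (if out ≠ [] ∧ pvLastB out ≠ "" ∧
            ¬ PySem.Str.startswith (pvLastB out) "- " = true ∧
            ¬ PySem.Str.startswith (pvLastB out) "* " = true then pvEmitB out "" else out)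
          (PySem.Str.rstrip raw)
      else pvEmitB out (PySem.Str.rstrip raw)) := by
  cases rest <;> simp [pvLoopB]

theorem pvMain (rest : List String) : ∀ (started : Bool) (fixed : List String),
    pvNorm fixed → (started = true ↔ fixed ≠ []) →
    pvLoopB rest (pvD fixed).1 = (pvD (pvFixLoopA rest started fixed)).1 ∧
    pvNorm (pvFixLoopA rest started fixed) := by
  induction rest with
  | nil => intro s fixed hn _; exact ⟨rfl, hn⟩
  | cons raw rest ih =>
    intro started fixed hn hs
    obtain ⟨hlast, hpb⟩ := pvD_spec fixed hn
    have hnil := pvD_nil_iff fixed hn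
    have hnl : PySem.Str.strip (PySem.Str.rstrip raw) = "" → PySem.Str.rstrip raw = "" :=
      pvNorm_rstrip raw
    have key : ∀ c : List String, c ≠ [] → pvNorm c →
        pvLoopB rest ((pvD (fixed ++ c)).1) = (pvD (pvFixLoopA rest true (fixed ++ c))).1 ∧
        pvNorm (pvFixLoopA rest true (fixed ++ c)) := by
      intro c hc hcn
      exact ih true (fixed ++ c) (pvNorm_append _ _ hn hcn) (by simp [hc])
    suffices h : ∃ c, c ≠ [] ∧ pvNorm c ∧
        pvFixLoopA (raw :: rest) started fixed = pvFixLoopA rest true (fixed ++ c) ∧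
        pvLoopB (raw :: rest) (pvD fixed).1 = pvLoopB rest ((pvD (fixed ++ c)).1) by
      obtain ⟨c, h0, hcn, hA, hB⟩ := h
      rw [hA, hB]; exact key c h0 hcn
    have hstrip0 : PySem.Str.strip "" = "" := rfl
    have hchunk : ∀ c : List String, (∀ e ∈ c, e = "" ∨ e = PySem.Str.rstrip raw) → pvNorm c := by
      intro c hc e he hh
      rcases hc e he with h | h
      · exact h
      · subst h; exact hnl hh
    have hDfix : pvD fixed = ((pvD fixed).1, decide (fixed.getLast? = some "")) := by
      rw [← hpb]
    by_cases h1 : PySem.Str.startswith (PySem.Str.rstrip raw) "#" = true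
    · -- heading
      have h1c : PySem.Chars.startswith (PySem.Chars.rstrip raw.toList) ['#'] = true := by
        simpa using h1
      have hne : PySem.Str.rstrip raw ≠ "" := pvStartswith_ne_empty _ "#" (by decide) h1
      have hsl : PySem.Str.strip (PySem.Str.rstrip raw) ≠ "" := fun hh => hne (hnl hh)
      by_cases hf : fixed = []
      · subst hf
        have hsta : started = false := by
          cases started
          · rfl
          · exact absurd (hs.mp rfl) (by simp)
        subst hsta
        cases rest with
        | nil =>
          refine ⟨[PySem.Str.rstrip raw], by simp, hchunk _ (by simp), ?_, ?_⟩
          · rw [pvFixLoopA_cons]; simp [ h1c]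
          · rw [pvLoopB_cons]
            rw [pvD_append]
            simp [ h1c, pvEmitB, pvLastB_eq, pvD, List.foldl, pvDedupStep, hsl, hne, hstrip0]
        | cons next rrest =>
          by_cases hnx : PySem.Str.strip next ≠ ""
          · refine ⟨[PySem.Str.rstrip raw, "", ""], by simp, hchunk _ (by simp), ?_, ?_⟩
            · rw [pvFixLoopA_cons]; simp [ h1c, hnx]
            · rw [pvLoopB_cons]
              rw [pvD_append]
              simp [ h1c, hnx, pvEmitB, pvLastB_eq, pvD, List.foldl, pvDedupStep, hsl, hne, hstrip0]
          · refine ⟨[PySem.Str.rstrip raw], by simp, hchunk _ (by simp), ?_, ?_⟩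
            · rw [pvFixLoopA_cons]; simp [ h1c, hnx]
            · rw [pvLoopB_cons]
              rw [pvD_append]
              simp [ h1c, hnx, pvEmitB, pvLastB_eq, pvD, List.foldl, pvDedupStep, hsl, hne]
      · -- fixed nonempty
        have hsta : started = true := hs.mpr hf
        subst hsta
        obtain ⟨e, he⟩ : ∃ e, fixed.getLast? = some e := by
          cases hq : fixed.getLast? with
          | none => exact absurd (List.getLast?_eq_none_iff.mp hq) hf
          | some a => exact ⟨a, rfl⟩
        have hemem : e ∈ fixed := List.mem_of_getLast? he
        have hLA : pvLastA fixed = e := by rw [pvLastA_eq, he]; rfl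
        have hLB : pvLastB (pvD fixed).1 = e := by rw [pvLastB_eq, hlast, he]; rfl
        have hone : (pvD fixed).1 ≠ [] := fun hq => hf (hnil.mp hq)
        by_cases hbe : e = ""
        · -- last line blank: no blank inserted before the heading
          have hse : PySem.Str.strip e = "" := by rw [hbe]; rfl
          cases rest with
          | nil =>
            refine ⟨[PySem.Str.rstrip raw], by simp, hchunk _ (by simp), ?_, ?_⟩
            · rw [pvFixLoopA_cons]; simp [ h1c, hLA, hse]
            · rw [pvLoopB_cons]
              rw [pvD_append, hDfix]
              simp [ h1c, hbe, hLB, hone, pvEmitB, List.foldl, pvDedupStep, hsl, hne, hstrip0]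
          | cons next rrest =>
            by_cases hnx : PySem.Str.strip next ≠ ""
            · refine ⟨[PySem.Str.rstrip raw, "", ""], by simp, hchunk _ (by simp), ?_, ?_⟩
              · rw [pvFixLoopA_cons]; simp [ h1c, hLA, hse, hnx]
              · rw [pvLoopB_cons]
                rw [pvD_append, hDfix]
                simp [ h1c, hnx, hbe, hLB, hone, pvEmitB, pvLastB_eq, List.foldl, pvDedupStep, hsl, hne, hstrip0]
            · refine ⟨[PySem.Str.rstrip raw], by simp, hchunk _ (by simp), ?_, ?_⟩
              · rw [pvFixLoopA_cons]; simp [ h1c, hLA, hse, hnx]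
              · rw [pvLoopB_cons]
                rw [pvD_append, hDfix]
                simp [ h1c, hnx, hbe, hLB, hone, pvEmitB, List.foldl, pvDedupStep, hsl, hne]
        · -- last line nonblank: blank inserted before the heading
          have hse : PySem.Str.strip e ≠ "" := fun hh => hbe (hn e hemem hh)
          cases rest with
          | nil =>
            refine ⟨["", PySem.Str.rstrip raw], by simp, hchunk _ (by simp), ?_, ?_⟩
            · rw [pvFixLoopA_cons]; simp [ h1c, hLA, hse, hf, List.append_assoc]
            · rw [pvLoopB_cons]
              rw [pvD_append, hDfix]
              simp [ h1c, he, hbe, hLB, hone, pvEmitB, pvLastB_eq, List.foldl, pvDedupStep, hsl, hne, hstrip0, List.append_assoc]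
          | cons next rrest =>
            by_cases hnx : PySem.Str.strip next ≠ ""
            · refine ⟨["", PySem.Str.rstrip raw, "", ""], by simp, hchunk _ (by simp), ?_, ?_⟩
              · rw [pvFixLoopA_cons]; simp [ h1c, hLA, hse, hf, hnx, List.append_assoc]
              · rw [pvLoopB_cons]
                rw [pvD_append, hDfix]
                simp [ h1c, hnx, he, hbe, hLB, hone, pvEmitB, pvLastB_eq, List.foldl, pvDedupStep, hsl, hne, hstrip0, List.append_assoc]
            · refine ⟨["", PySem.Str.rstrip raw], by simp, hchunk _ (by simp), ?_, ?_⟩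
              · rw [pvFixLoopA_cons]; simp [ h1c, hLA, hse, hf, hnx, List.append_assoc]
              · rw [pvLoopB_cons]
                rw [pvD_append, hDfix]
                simp [ h1c, hnx, he, hbe, hLB, hone, pvEmitB, pvLastB_eq, List.foldl, pvDedupStep, hsl, hne, hstrip0, List.append_assoc]
    · have h1c : ¬ PySem.Chars.startswith (PySem.Chars.rstrip raw.toList) ['#'] = true := by
        simpa using h1
      by_cases h2 : PySem.Str.startswith (PySem.Str.rstrip raw) "- " = true ∨
          PySem.Str.startswith (PySem.Str.rstrip raw) "* " = true
      · -- list item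
        have h2c : PySem.Chars.startswith (PySem.Chars.rstrip raw.toList) ['-', ' '] = true ∨
            PySem.Chars.startswith (PySem.Chars.rstrip raw.toList) ['*', ' '] = true := by
          simpa using h2
        have hne : PySem.Str.rstrip raw ≠ "" := by
          rcases h2 with h2 | h2
          · exact pvStartswith_ne_empty _ "- " (by decide) h2
          · exact pvStartswith_ne_empty _ "* " (by decide) h2
        have hsl : PySem.Str.strip (PySem.Str.rstrip raw) ≠ "" := fun hh => hne (hnl hh)
        by_cases hf : fixed = []
        · subst hf
          have hsta : started = false := by
            cases started
            · rfl
            · exact absurd (hs.mp rfl) (by simp)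
          subst hsta
          refine ⟨[PySem.Str.rstrip raw], by simp, hchunk _ (by simp), ?_, ?_⟩
          · rw [pvFixLoopA_cons]; simp [ h1c, h2c]
          · rw [pvLoopB_cons]
            rw [pvD_append]
            simp [ h1c, h2c, pvEmitB, pvLastB_eq, pvD, List.foldl, pvDedupStep, hsl, hne]
        · have hsta : started = true := hs.mpr hf
          subst hsta
          obtain ⟨e, he⟩ : ∃ e, fixed.getLast? = some e := by
            cases hq : fixed.getLast? with
            | none => exact absurd (List.getLast?_eq_none_iff.mp hq) hf
            | some a => exact ⟨a, rfl⟩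
          have hemem : e ∈ fixed := List.mem_of_getLast? he
          have hLA : pvLastA fixed = e := by rw [pvLastA_eq, he]; rfl
          have hLB : pvLastB (pvD fixed).1 = e := by rw [pvLastB_eq, hlast, he]; rfl
          have hone : (pvD fixed).1 ≠ [] := fun hq => hf (hnil.mp hq)
          by_cases hcond : PySem.Str.strip e ≠ "" ∧
              ¬ PySem.Str.startswith e "- " = true ∧ ¬ PySem.Str.startswith e "* " = true
          · have hbe : e ≠ "" := fun hh => hcond.1 (by rw [hh]; rfl)
            have hc1 : PySem.Chars.startswith e.toList ['-', ' '] = false := by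
              simpa using hcond.2.1
            have hc2 : PySem.Chars.startswith e.toList ['*', ' '] = false := by
              simpa using hcond.2.2
            refine ⟨["", PySem.Str.rstrip raw], by simp, hchunk _ (by simp), ?_, ?_⟩
            · rw [pvFixLoopA_cons]
              simp [ h1c, h2c, hLA, hf, hcond.1, hc1, hc2]
            · rw [pvLoopB_cons]
              rw [pvD_append, hDfix]
              simp [ h1c, h2c, he, hbe, hLB, hone, hc1, hc2, pvEmitB, pvLastB_eq, List.foldl, pvDedupStep, hsl, hne, hstrip0, List.append_assoc]
          · -- no blank inserted before the list item
            have hc : PySem.Str.strip e = "" ∨ PySem.Str.startswith e "- " = true ∨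
                PySem.Str.startswith e "* " = true := by
              by_contra hq
              push Not at hq
              exact hcond ⟨hq.1, hq.2.1, hq.2.2⟩
            refine ⟨[PySem.Str.rstrip raw], by simp, hchunk _ (by simp), ?_, ?_⟩
            · rw [pvFixLoopA_cons]
              rcases hc with hc | hc | hc
              · have hce : e = "" := hn e hemem hc
                simp [ h1c, h2c, hLA, hf, hce, hstrip0]
              · have hcc : PySem.Chars.startswith e.toList ['-', ' '] = true := by simpa using hc
                simp [ h1c, h2c, hLA, hf, hcc]
              · have hcc : PySem.Chars.startswith e.toList ['*', ' '] = true := by simpa using hc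
                simp [ h1c, h2c, hLA, hf, hcc]
            · rw [pvLoopB_cons]
              rw [pvD_append, hDfix]
              rcases hc with hc | hc | hc
              · have hce : e = "" := hn e hemem hc
                simp [ h1c, h2c, hce, hLB, hone, pvEmitB, List.foldl, pvDedupStep, hsl, hne]
              · have hcc : PySem.Chars.startswith e.toList ['-', ' '] = true := by simpa using hc
                have hbe : e ≠ "" := pvStartswith_ne_empty e "- " (by decide) hc
                simp [ h1c, h2c, hbe, hcc, hLB, hone, pvEmitB, List.foldl, pvDedupStep, hsl, hne]
              · have hcc : PySem.Chars.startswith e.toList ['*', ' '] = true := by simpa using hc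
                have hbe : e ≠ "" := pvStartswith_ne_empty e "* " (by decide) hc
                simp [ h1c, h2c, hbe, hcc, hLB, hone, pvEmitB, List.foldl, pvDedupStep, hsl, hne]
      · -- plain line
        have h2c : ¬ (PySem.Chars.startswith (PySem.Chars.rstrip raw.toList) ['-', ' '] = true ∨
            PySem.Chars.startswith (PySem.Chars.rstrip raw.toList) ['*', ' '] = true) := by
          simpa using h2
        refine ⟨[PySem.Str.rstrip raw], by simp, hchunk _ (by simp), ?_, ?_⟩
        · rw [pvFixLoopA_cons]; simp [ h1c, h2c]
        · rw [pvLoopB_cons]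
          rw [pvD_append, hDfix]
          by_cases hbl : PySem.Str.rstrip raw = ""
          · by_cases hf : fixed = []
            · subst hf
              simp [ hbl, pvEmitB, pvLastB_eq, pvD, List.foldl, pvDedupStep, hstrip0]
            · obtain ⟨e, he⟩ : ∃ e, fixed.getLast? = some e := by
                cases hq : fixed.getLast? with
                | none => exact absurd (List.getLast?_eq_none_iff.mp hq) hf
                | some a => exact ⟨a, rfl⟩
              have hLB : pvLastB (pvD fixed).1 = e := by rw [pvLastB_eq, hlast, he]; rfl
              have hone : (pvD fixed).1 ≠ [] := fun hq => hf (hnil.mp hq)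
              by_cases hbe : e = ""
              · simp [ hbl, he, hbe, hLB, hone, pvEmitB, List.foldl, pvDedupStep, hstrip0, PySem.Chars.startswith]
              · simp [ hbl, he, hbe, hLB, hone, pvEmitB, List.foldl, pvDedupStep, hstrip0, PySem.Chars.startswith]
          · have hsl : PySem.Str.strip (PySem.Str.rstrip raw) ≠ "" := fun hh => hbl (hnl hh)
            simp [ h1c, h2c, hbl, pvEmitB, List.foldl, pvDedupStep, hsl]

theorem pvFinal (L : List String) :
    (if ((pvFixLoopA L false []).foldl pvDedupStep ([], false)).1 ≠ [] ∧
        PySem.Str.strip (pvLastA ((pvFixLoopA L false []).foldl pvDedupStep ([], false)).1) ≠ "" then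
      ((pvFixLoopA L false []).foldl pvDedupStep ([], false)).1 ++ [""]
    else ((pvFixLoopA L false []).foldl pvDedupStep ([], false)).1) =
    (if pvLoopB L [] ≠ [] ∧ pvLastB (pvLoopB L []) ≠ "" then pvLoopB L [] ++ [""]
    else pvLoopB L []) := by
  have hn0 : pvNorm [] := by intro e he; simp at he
  obtain ⟨hB, hnF⟩ := pvMain L false [] hn0 (by simp)
  have hres : pvLoopB L [] = (pvD (pvFixLoopA L false [])).1 := hB
  obtain ⟨hlast, _⟩ := pvD_spec (pvFixLoopA L false []) hnF
  have hsame : ((pvFixLoopA L false []).foldl pvDedupStep ([], false)).1 = pvLoopB L [] := by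
    rw [hres]; rfl
  rw [hsame]
  have hcond : (pvLoopB L [] ≠ [] ∧ PySem.Str.strip (pvLastA (pvLoopB L [])) ≠ "") ↔
      (pvLoopB L [] ≠ [] ∧ pvLastB (pvLoopB L []) ≠ "") := by
    constructor
    · rintro ⟨h1, h2⟩
      refine ⟨h1, fun hq => h2 ?_⟩
      rw [pvLastA_eq]
      rw [pvLastB_eq] at hq
      rw [hq]; rfl
    · rintro ⟨h1, h2⟩
      refine ⟨h1, fun hq => h2 ?_⟩
      obtain ⟨e, he⟩ : ∃ e, (pvLoopB L []).getLast? = some e := by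
        cases hq2 : (pvLoopB L []).getLast? with
        | none => exact absurd (List.getLast?_eq_none_iff.mp hq2) h1
        | some a => exact ⟨a, rfl⟩
      have heF : (pvFixLoopA L false []).getLast? = some e := by
        rw [← hlast, ← hres, he]
      have hmem : e ∈ pvFixLoopA L false [] := List.mem_of_getLast? heF
      have hA : pvLastA (pvLoopB L []) = e := by rw [pvLastA_eq, he]; rfl
      have hBl : pvLastB (pvLoopB L []) = e := by rw [pvLastB_eq, he]; rfl
      rw [hBl]
      rw [hA] at hq
      exact hnF e hmem hq
  by_cases hc : pvLoopB L [] ≠ [] ∧ PySem.Str.strip (pvLastA (pvLoopB L [])) ≠ ""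
  · rw [if_pos hc, if_pos (hcond.mp hc)]
  · rw [if_neg hc, if_neg (fun hq => hc (hcond.mpr hq))]

theorem final_eq (content : String) :
    fix_markdown_formatting content = fix_markdown_formatting_alt content :=
  congrArg (PySem.Str.join "\n") (pvFinal ((PySem.Str.split? content "\n").getD []))

-- ===== VERDICT (by name: the statement is the Claim_ definition above) =====
theorem fix_markdown_formatting_spec : Claim_equal_fix_markdown_formatting := by
  intro content _
  exact final_eq content
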